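-- pv_equiv track=rewrite | github.com/pjj123213/HFUT-cs-AI | 大二上/python/Python实验/exp_1/4_(1).py | connect_strings
-- ===== SOURCE A (Python) =====
-- def connect_strings(str1, str2):
--     # 计算可能重叠的最大长度
--     max_length = min(len(str1),len(str2))
--     # 通过lambda表达式来判断length长度的字符串是否为交叉子串
--     is_cross = lambda length : str1[-length:] == str2[:length]
--     # 最大的交叉长度，初始时为0
--     cross_length = 0
--     for i in range(max_length):
--         if is_cross(i):
--             cross_length = i
--     return cross_length, str1 + str2[cross_length:]
-- ===== SOURCE B (Python) =====
-- def connect_strings(str1, str2):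
--     # KMP: stream str1 through the prefix automaton of str2; the final state is
--     # the length of the longest prefix of str2 that is a suffix of str1.
--     if not str2:
--         return 0, str1 + str2
--     fail = [0] * len(str2)
--     k = 0
--     for i in range(1, len(str2)):
--         while k and str2[i] != str2[k]:
--             k = fail[k - 1]
--         if str2[i] == str2[k]:
--             k += 1
--         fail[i] = k
--     state = 0
--     for c in str1:
--         if state == len(str2):
--             state = fail[state - 1]
--         while state and c != str2[state]:
--             state = fail[state - 1]
--         if c == str2[state]:
--             state += 1
--     return state, str1 + str2[state:]
-- ===== Notes on version B (the rewrite author's own statement) =====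
-- stated objective: faster
-- what changed: B replaces A's quadratic scan that slices and compares every candidate prefix/suffix pair by the KMP prefix automaton of str2 streamed over str1, whose final state is the maximal overlap.
-- intended difference: On inputs whose full-length overlap matches (the last min(len) characters of str1 equal the first min(len) characters of str2, with min(len) >= 1), A returns a strictly smaller overlap because range(max_length) never tests max_length itself, while B returns the full overlap min(len), which is the intended maximal overlap. — e.g. on connect_strings("a", "a"): A returns (0, "aa"), B returns (1, "a")
import Mathlib
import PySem

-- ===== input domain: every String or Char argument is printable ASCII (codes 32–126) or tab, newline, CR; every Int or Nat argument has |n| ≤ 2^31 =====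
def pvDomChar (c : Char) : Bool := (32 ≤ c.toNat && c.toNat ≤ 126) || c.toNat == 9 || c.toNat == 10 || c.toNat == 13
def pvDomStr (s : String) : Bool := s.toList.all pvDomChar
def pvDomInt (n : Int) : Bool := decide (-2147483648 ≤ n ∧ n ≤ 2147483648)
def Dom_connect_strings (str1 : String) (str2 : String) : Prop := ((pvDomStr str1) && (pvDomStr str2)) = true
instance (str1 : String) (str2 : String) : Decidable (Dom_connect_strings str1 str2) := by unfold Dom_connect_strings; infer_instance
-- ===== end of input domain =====

-- B replaces A's quadratic slice-and-compare scan by the KMP prefix automaton of str2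
-- streamed over str1; outside D_ (full-length overlap) the returned pair is proved equal.

-- ===== PORT A =====
def connect_strings (str1 : String) (str2 : String) : Int × String :=
  let max_length : Int := min (PySem.Str.len str1) (PySem.Str.len str2)
  let is_cross : Int → Bool := fun length =>
    PySem.Str.slice str1 (some (-length)) none == PySem.Str.slice str2 none (some length)
  let cross_length : Int :=
    (PySem.List.pyRange 0 max_length 1).foldl (fun c i => if is_cross i then i else c) 0
  (cross_length, str1 ++ PySem.Str.slice str2 (some cross_length) none)

-- ===== PORT B =====
-- the inner 'while k and c != str2[k]: k = fail[k-1]' of Source B; fuel = the starting k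
-- (each step strictly decreases k because fail[j] ≤ j, so fuel k is exact)
def kmpWhile (p : List Char) (fail : List Nat) (c : Char) : Nat → Nat → Nat
  | 0, k => k
  | fuel+1, k => if k ≠ 0 ∧ c ≠ p.getD k ' ' then kmpWhile p fail c fuel (fail.getD (k-1) 0) else k

-- one iteration of Source B's failure-table loop (body of 'for i in range(1, len(str2))')
def kmpBuildStep (p : List Char) (st : List Nat × Nat) (i : Nat) : List Nat × Nat :=
  let k1 := kmpWhile p st.1 (p.getD i ' ') st.2 st.2
  let k2 := if p.getD i ' ' = p.getD k1 ' ' then k1 + 1 else k1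
  (st.1.set i k2, k2)

-- one iteration of Source B's streaming loop (body of 'for c in str1')
def kmpStreamStep (p : List Char) (fail : List Nat) (s : Nat) (c : Char) : Nat :=
  let s1 := if s = p.length then fail.getD (s-1) 0 else s
  let s2 := kmpWhile p fail c s1 s1
  if c = p.getD s2 ' ' then s2 + 1 else s2

def connect_strings_alt (str1 : String) (str2 : String) : Int × String :=
  if str2.toList = [] then (0, str1 ++ str2)
  else
    let p := str2.toList
    let n := p.length
    let fail := ((List.range' 1 (n-1)).foldl (kmpBuildStep p) (List.replicate n 0, 0)).1
    let state := str1.toList.foldl (kmpStreamStep p fail) 0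
    ((state : Int), str1 ++ PySem.Str.slice str2 (some (state : Int)) none)

-- ===== PRECONDITION & SPEC =====
-- On inputs whose full-length overlap matches (the last min(len) chars of str1 equal the
-- first min(len) chars of str2, min(len) ≥ 1), A returns a strictly smaller overlap because
-- range(max_length) never tests max_length itself; B returns the full overlap min(len),
-- the intended maximal one.
def D_connect_strings (str1 : String) (str2 : String) : Prop :=
  1 ≤ min str1.toList.length str2.toList.length ∧
    str1.toList.drop (str1.toList.length - min str1.toList.length str2.toList.length)
      = str2.toList.take (min str1.toList.length str2.toList.length)
instance (str1 : String) (str2 : String) : Decidable (D_connect_strings str1 str2) := by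
  unfold D_connect_strings; infer_instance

def Spec_connect_strings (str1 : String) (str2 : String) (out : Int × String) : Prop :=
  ¬ D_connect_strings str1 str2 → out = connect_strings_alt str1 str2
instance (str1 : String) (str2 : String) (out : Int × String) : Decidable (Spec_connect_strings str1 str2 out) := by
  unfold Spec_connect_strings; infer_instance

def pvDiffWitness_connect_strings : String × String := ("a", "a")
def pvDiffWitnessOut_connect_strings : (Int × String) × (Int × String) := ((0, "aa"), (1, "a"))

-- ===== CLAIM (what is proved, stated in full; the proofs are below) =====
def Claim_unchanged_connect_strings : Prop := ∀ (str1 : String) (str2 : String), Dom_connect_strings str1 str2 → Spec_connect_strings str1 str2 (connect_strings str1 str2)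
def Claim_changed_connect_strings : Prop := Dom_connect_strings (pvDiffWitness_connect_strings.1) (pvDiffWitness_connect_strings.2) ∧ D_connect_strings (pvDiffWitness_connect_strings.1) (pvDiffWitness_connect_strings.2) ∧ connect_strings (pvDiffWitness_connect_strings.1) (pvDiffWitness_connect_strings.2) = pvDiffWitnessOut_connect_strings.1 ∧ connect_strings_alt (pvDiffWitness_connect_strings.1) (pvDiffWitness_connect_strings.2) = pvDiffWitnessOut_connect_strings.2 ∧ pvDiffWitnessOut_connect_strings.1 ≠ pvDiffWitnessOut_connect_strings.2
def Claim_exact_connect_strings : Prop := ∀ (str1 : String) (str2 : String), Dom_connect_strings str1 str2 → D_connect_strings str1 str2 → connect_strings str1 str2 ≠ connect_strings_alt str1 str2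

-- ===== LEMMAS AND PROOFS =====

-- longest k ≤ |p| with (p.take k) a suffix of t
def Mx (p t : List Char) : Nat := Nat.findGreatest (fun k => p.take k <:+ t) p.length
-- prefix function: longest j ≤ i with (p.take j) a suffix of p.take (i+1)
def piF (p : List Char) (i : Nat) : Nat := Nat.findGreatest (fun j => p.take j <:+ p.take (i+1)) i

lemma take_suffix_take {p t : List Char} {j k : Nat} (hj : p.take j <:+ t)
    (hk : p.take k <:+ t) (h : j ≤ k) : p.take j <:+ p.take k :=
  List.suffix_of_suffix_length_le hj hk (by simp [List.length_take]; omega)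

lemma piF_le (p : List Char) (i : Nat) : piF p i ≤ i := Nat.findGreatest_le i

lemma piF_suffix (p : List Char) (i : Nat) : p.take (piF p i) <:+ p.take (i+1) := by
  have h0 : (fun j => p.take j <:+ p.take (i+1)) 0 := by simp
  exact Nat.findGreatest_spec (P := fun j => p.take j <:+ p.take (i+1)) (Nat.zero_le i) h0

lemma le_piF {p : List Char} {i j : Nat} (hj : j ≤ i) (h : p.take j <:+ p.take (i+1)) :
    j ≤ piF p i := Nat.le_findGreatest hj h

lemma Mx_le (p t : List Char) : Mx p t ≤ p.length := Nat.findGreatest_le p.length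

lemma Mx_suffix (p t : List Char) : p.take (Mx p t) <:+ t := by
  have h0 : (fun k => p.take k <:+ t) 0 := by simp
  exact Nat.findGreatest_spec (P := fun k => p.take k <:+ t) (Nat.zero_le p.length) h0

lemma le_Mx {p t : List Char} {k : Nat} (hk : k ≤ p.length) (h : p.take k <:+ t) :
    k ≤ Mx p t := Nat.le_findGreatest hk h

lemma Mx_le_len (p t : List Char) : Mx p t ≤ t.length := by
  have h := (Mx_suffix p t).length_le
  rw [List.length_take] at h
  have := Mx_le p t
  omega

lemma Mx_nil (p : List Char) : Mx p [] = 0 := by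
  rw [Mx, Nat.findGreatest_eq_iff]
  refine ⟨Nat.zero_le _, by simp, ?_⟩
  intro k hk hk2 hs
  have := hs.length_le
  rw [List.length_take, List.length_nil] at this
  omega

lemma concat_suffix_concat {a t : List Char} {x c : Char} :
    a ++ [x] <:+ t ++ [c] ↔ a <:+ t ∧ x = c := by
  rw [← List.reverse_prefix]
  simp only [List.reverse_append, List.reverse_cons, List.reverse_nil, List.nil_append,
    List.singleton_append, List.cons_prefix_cons, List.reverse_prefix]
  tauto

lemma take_succ_concat {p : List Char} {k : Nat} (h : k < p.length) :
    p.take (k+1) = p.take k ++ [p[k]] := by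
  rw [List.take_add_one]
  simp [List.getElem?_eq_getElem h]

lemma take_succ_suffix_concat {p t : List Char} {c : Char} {k : Nat} (h : k < p.length) :
    p.take (k+1) <:+ t ++ [c] ↔ p.take k <:+ t ∧ p[k] = c := by
  rw [take_succ_concat h, concat_suffix_concat]

lemma suffix_iff_drop {p t : List Char} {k : Nat} (hk : k ≤ p.length) (hkt : k ≤ t.length) :
    t.drop (t.length - k) = p.take k ↔ p.take k <:+ t := by
  constructor
  · intro h; rw [← h]; exact List.drop_suffix _ _
  · intro h
    obtain ⟨s, hs⟩ := h
    have hl : (p.take k).length = k := by simp [List.length_take]; omega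
    have hsl : s.length = t.length - k := by
      have := congrArg List.length hs
      simp [hl] at this; omega
    rw [← hs]
    have hlen2 : (s ++ p.take k).length - k = s.length := by simp [hl]
    rw [hlen2, List.drop_left]

lemma kmpWhile_spec (p : List Char) (fail : List Nat) (c : Char) :
    ∀ (fuel K : Nat), K < p.length → K ≤ fuel →
    (∀ j, j < K → fail.getD j 0 = piF p j) →
    (kmpWhile p fail c fuel K ≤ K ∧
     p.take (kmpWhile p fail c fuel K) <:+ p.take K ∧
     (kmpWhile p fail c fuel K = 0 ∨ c = p.getD (kmpWhile p fail c fuel K) ' ') ∧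
     (∀ j, j ≤ K → p.take j <:+ p.take K → c = p.getD j ' ' → j ≤ kmpWhile p fail c fuel K)) := by
  intro fuel
  induction fuel with
  | zero =>
    intro K hK hle _
    interval_cases K
    refine ⟨le_rfl, by simp [kmpWhile], Or.inl rfl, ?_⟩
    intro j hj _ _; omega
  | succ fuel ih =>
    intro K hK hle hfail
    by_cases hcond : K ≠ 0 ∧ c ≠ p.getD K ' '
    · rw [kmpWhile, if_pos hcond]
      obtain ⟨hK0, hcK⟩ := hcond
      have hfK : fail.getD (K-1) 0 = piF p (K-1) := hfail _ (by omega)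
      have hKm : K - 1 + 1 = K := by omega
      have hKs : p.take (piF p (K-1)) <:+ p.take K := by
        have := piF_suffix p (K-1); rwa [hKm] at this
      have hK'le : piF p (K-1) ≤ K - 1 := piF_le p (K-1)
      rw [hfK]
      obtain ⟨h1, h2, h3, h4⟩ := ih (piF p (K-1)) (by omega) (by omega)
        (fun j hj => hfail j (by omega))
      refine ⟨by omega, h2.trans hKs, h3, ?_⟩
      intro j hj hsj hcj
      have hjK : j ≠ K := by
        intro h; exact hcK (h ▸ hcj)
      have hj1 : j ≤ K - 1 := by omega
      have hjpi : j ≤ piF p (K-1) := le_piF hj1 (by rwa [hKm])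
      exact h4 j hjpi (take_suffix_take hsj hKs hjpi) hcj
    · rw [kmpWhile, if_neg hcond]
      push Not at hcond
      refine ⟨le_rfl, List.suffix_refl _, ?_, fun j hj _ _ => hj⟩
      by_cases h0 : K = 0
      · exact Or.inl h0
      · exact Or.inr (hcond h0)

lemma kmp_step_core (p : List Char) (fail : List Nat) (c : Char) (K0 B : Nat) (t : List Char)
    (hK0 : K0 < p.length) (hB : B ≤ p.length)
    (hfail : ∀ j, j < K0 → fail.getD j 0 = piF p j)
    (hsub : ∀ j, j ≤ K0 → p.take j <:+ p.take K0 → p.take j <:+ t)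
    (hsup : ∀ j, j < B → p.take j <:+ t → j ≤ K0 ∧ p.take j <:+ p.take K0) :
    ((if c = p.getD (kmpWhile p fail c K0 K0) ' ' then kmpWhile p fail c K0 K0 + 1 else kmpWhile p fail c K0 K0) ≤ K0 + 1 ∧
     p.take (if c = p.getD (kmpWhile p fail c K0 K0) ' ' then kmpWhile p fail c K0 K0 + 1 else kmpWhile p fail c K0 K0) <:+ t ++ [c] ∧
     (∀ k, k ≤ B → p.take k <:+ t ++ [c] →
        k ≤ (if c = p.getD (kmpWhile p fail c K0 K0) ' ' then kmpWhile p fail c K0 K0 + 1 else kmpWhile p fail c K0 K0))) := by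
  obtain ⟨h1, h2, h3, h4⟩ := kmpWhile_spec p fail c K0 K0 hK0 le_rfl hfail
  set r := kmpWhile p fail c K0 K0 with hr
  have hrp : r < p.length := by omega
  have maxLem : ∀ k, k ≤ B → p.take k <:+ t ++ [c] → k = 0 ∨ (k - 1 ≤ r ∧ c = p.getD (k-1) ' ') := by
    intro k hk hks
    match k with
    | 0 => exact Or.inl rfl
    | j+1 =>
      have hjB : j < B := by omega
      have hjp : j < p.length := by omega
      rw [take_succ_suffix_concat hjp] at hks
      obtain ⟨hjt, hjc⟩ := hks
      obtain ⟨hjK0, hjch⟩ := hsup j hjB hjt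
      have hcg : c = p.getD j ' ' := by rw [List.getD_eq_getElem _ _ hjp, hjc]
      exact Or.inr ⟨by simpa using h4 j hjK0 hjch hcg, by simpa using hcg⟩
  by_cases hc : c = p.getD r ' '
  · rw [if_pos hc]
    refine ⟨by omega, ?_, ?_⟩
    · rw [take_succ_suffix_concat hrp]
      exact ⟨hsub r h1 h2, by rw [← List.getD_eq_getElem _ _ hrp, ← hc]⟩
    · intro k hk hks
      rcases maxLem k hk hks with h | ⟨h, _⟩ <;> omega
  · rw [if_neg hc]
    have hr0 : r = 0 := by
      rcases h3 with h | h
      · exact h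
      · exact absurd h hc
    refine ⟨by omega, by simp [hr0], ?_⟩
    intro k hk hks
    rcases maxLem k hk hks with h | ⟨h, hch⟩
    · omega
    · exfalso
      have : k - 1 = 0 := by omega
      rw [this] at hch
      rw [hr0] at hc
      exact hc hch

lemma piF_zero (p : List Char) : piF p 0 = 0 := Nat.findGreatest_zero

lemma build_inv (p : List Char) (hp : p ≠ []) :
    ∀ cnt, cnt ≤ p.length - 1 →
    (((List.range' 1 cnt).foldl (kmpBuildStep p) (List.replicate p.length 0, 0)).1.length = p.length ∧
     (∀ j, j ≤ cnt →
        ((List.range' 1 cnt).foldl (kmpBuildStep p) (List.replicate p.length 0, 0)).1.getD j 0 = piF p j) ∧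
     ((List.range' 1 cnt).foldl (kmpBuildStep p) (List.replicate p.length 0, 0)).2 = piF p cnt) := by
  have hn : 1 ≤ p.length := List.length_pos_of_ne_nil hp
  intro cnt
  induction cnt with
  | zero =>
    intro _
    refine ⟨by simp, ?_, by simp [piF_zero]⟩
    intro j hj
    interval_cases j
    simp [piF_zero]
  | succ cnt ih =>
    intro hcnt
    obtain ⟨hlen, hcorr, hk⟩ := ih (by omega)
    have hrange : List.range' 1 (cnt+1) = List.range' 1 cnt ++ [cnt+1] := by
      have := List.range'_concat (s := 1) (n := cnt) (step := 1)
      simpa [Nat.add_comm] using this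
    rw [hrange, List.foldl_append, List.foldl_cons, List.foldl_nil]
    set st := (List.range' 1 cnt).foldl (kmpBuildStep p) (List.replicate p.length 0, 0) with hst
    have hilt : cnt + 1 < p.length := by omega
    have hpiFle : piF p cnt ≤ cnt := piF_le p cnt
    have hK0lt : piF p cnt < p.length := by omega
    have hc : p.getD (cnt+1) ' ' = p[cnt+1] := List.getD_eq_getElem _ _ hilt
    have hpsfx : p.take (piF p cnt) <:+ p.take (cnt+1) := piF_suffix p cnt
    have core := kmp_step_core p st.1 (p.getD (cnt+1) ' ') (piF p cnt) (cnt+1) (p.take (cnt+1))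
      hK0lt (by omega)
      (fun j hj => hcorr j (by omega))
      (fun j hj hjs => hjs.trans hpsfx)
      (fun j hj hjs => ⟨le_piF (by omega) hjs, take_suffix_take hjs hpsfx (le_piF (by omega) hjs)⟩)
    rw [← hk] at core
    obtain ⟨c1, c2, c3⟩ := core
    have htc : p.take (cnt+1) ++ [p.getD (cnt+1) ' '] = p.take (cnt+1+1) := by
      rw [hc, ← take_succ_concat hilt]
    rw [htc] at c2 c3
    set s := if p.getD (cnt+1) ' ' = p.getD (kmpWhile p st.1 (p.getD (cnt+1) ' ') st.2 st.2) ' '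
      then kmpWhile p st.1 (p.getD (cnt+1) ' ') st.2 st.2 + 1
      else kmpWhile p st.1 (p.getD (cnt+1) ' ') st.2 st.2 with hs
    have hspi : s = piF p (cnt+1) := by
      rw [piF, eq_comm, Nat.findGreatest_eq_iff]
      refine ⟨by omega, fun _ => c2, ?_⟩
      intro k hk1 hk2 hks
      have := c3 k (by omega) hks
      omega
    have hstep : kmpBuildStep p st (cnt+1) = (st.1.set (cnt+1) s, s) := rfl
    rw [hstep]
    refine ⟨by simp [hlen], ?_, ?_⟩
    · intro j hj
      by_cases hji : j = cnt+1
      · subst hji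
        simp only []
        rw [List.getD_eq_getElem?_getD, List.getElem?_set_self (by omega), Option.getD_some, hspi]
      · have hj' : j ≤ cnt := by omega
        simp only []
        rw [List.getD_eq_getElem?_getD, List.getElem?_set_ne (by omega), ← List.getD_eq_getElem?_getD]
        exact hcorr j hj'
    · simpa using hspi

lemma stream_inv (p : List Char) (fail : List Nat) (hp : p ≠ [])
    (hfail : ∀ j, j < p.length → fail.getD j 0 = piF p j) :
    ∀ t : List Char, t.foldl (kmpStreamStep p fail) 0 = Mx p t := by
  have hn : 1 ≤ p.length := List.length_pos_of_ne_nil hp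
  have hlm : p.length - 1 + 1 = p.length := by omega
  have hps : p.take (piF p (p.length - 1)) <:+ p := by
    have := piF_suffix p (p.length - 1)
    rwa [hlm, List.take_length] at this
  have hpile : piF p (p.length - 1) ≤ p.length - 1 := piF_le p _
  intro t
  induction t using List.reverseRecOn with
  | nil => simp [Mx_nil]
  | append_singleton t c ih =>
    rw [List.foldl_append, List.foldl_cons, List.foldl_nil, ih]
    set K0 := if Mx p t = p.length then fail.getD (Mx p t - 1) 0 else Mx p t with hK0
    have hstep : kmpStreamStep p fail (Mx p t) c
        = if c = p.getD (kmpWhile p fail c K0 K0) ' ' then kmpWhile p fail c K0 K0 + 1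
          else kmpWhile p fail c K0 K0 := rfl
    have hKle := Mx_le p t
    have hKsfx := Mx_suffix p t
    have hK0pi : Mx p t = p.length → K0 = piF p (p.length - 1) := by
      intro hfull
      rw [hK0, if_pos hfull, hfull]
      exact hfail _ (by omega)
    have hK0eq : Mx p t ≠ p.length → K0 = Mx p t := by
      intro hfull; rw [hK0, if_neg hfull]
    have hK0lt : K0 < p.length := by
      by_cases hfull : Mx p t = p.length
      · rw [hK0pi hfull]; omega
      · rw [hK0eq hfull]; omega
    have hK0sfx : p.take K0 <:+ t := by
      by_cases hfull : Mx p t = p.length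
      · have hpt : p <:+ t := by have := hKsfx; rwa [hfull, List.take_length] at this
        rw [hK0pi hfull]; exact hps.trans hpt
      · rw [hK0eq hfull]; exact hKsfx
    have hsup : ∀ j, j < p.length → p.take j <:+ t → j ≤ K0 ∧ p.take j <:+ p.take K0 := by
      intro j hj hjs
      have hjK : j ≤ Mx p t := le_Mx (by omega) hjs
      by_cases hfull : Mx p t = p.length
      · have hpt : p <:+ t := by have := hKsfx; rwa [hfull, List.take_length] at this
        have hjp : p.take j <:+ p.take (p.length - 1 + 1) := by
          rw [hlm, List.take_length]
          exact List.suffix_of_suffix_length_le hjs hpt (by rw [List.length_take]; omega)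
        have hjpi : j ≤ piF p (p.length - 1) := le_piF (by omega) hjp
        rw [hK0pi hfull]
        exact ⟨hjpi, take_suffix_take hjs (hps.trans hpt) hjpi⟩
      · rw [hK0eq hfull]
        exact ⟨hjK, take_suffix_take hjs hKsfx hjK⟩
    obtain ⟨c1, c2, c3⟩ := kmp_step_core p fail c K0 p.length t hK0lt le_rfl
      (fun j hj => hfail j (by omega))
      (fun j _ hjs => hjs.trans hK0sfx)
      hsup
    rw [hstep, eq_comm, Mx, Nat.findGreatest_eq_iff]
    exact ⟨by omega, fun _ => c2, fun k hk1 hk2 hks => by have := c3 k hk2 hks; omega⟩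

-- fail table produced by B's build loop is the prefix function everywhere
lemma build_correct (p : List Char) (hp : p ≠ []) :
    ∀ j, j < p.length →
      (((List.range' 1 (p.length - 1)).foldl (kmpBuildStep p) (List.replicate p.length 0, 0)).1).getD j 0
        = piF p j := by
  intro j hj
  exact (build_inv p hp (p.length - 1) le_rfl).2.1 j (by omega)

-- ===== A-side characterisation =====

lemma foldl_keepLast_cast (P : Int → Bool) (m : Nat) :
    (List.range m).foldl (fun (c : Int) (k : Nat) => if P (k:Int) then (k:Int) else c) 0
      = (((List.range m).foldl (fun (c : Nat) (k : Nat) => if P (k:Int) then k else c) 0 : Nat) : Int) := by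
  induction m with
  | zero => simp
  | succ m ih =>
    rw [List.range_succ, List.foldl_append, List.foldl_append, List.foldl_cons, List.foldl_cons,
      List.foldl_nil, List.foldl_nil, ih]
    split <;> simp

lemma foldl_keepLast_findGreatest (Q : Nat → Bool) (m : Nat) :
    (List.range m).foldl (fun (c : Nat) (k : Nat) => if Q k then k else c) 0
      = Nat.findGreatest (fun k => Q k = true) (m-1) := by
  induction m with
  | zero => simp
  | succ m ih =>
    rw [List.range_succ, List.foldl_append, List.foldl_cons, List.foldl_nil, ih]
    match m with
    | 0 => simp
    | m'+1 =>
      rw [show m' + 1 + 1 - 1 = m' + 1 from rfl, show m' + 1 - 1 = m' from rfl,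
        Nat.findGreatest_succ]

lemma findGreatest_congr (P Q : Nat → Prop) [DecidablePred P] [DecidablePred Q] (n : Nat)
    (h : ∀ k, 1 ≤ k → k ≤ n → (P k ↔ Q k)) :
    Nat.findGreatest P n = Nat.findGreatest Q n := by
  induction n with
  | zero => rfl
  | succ n ih =>
    rw [Nat.findGreatest_succ, Nat.findGreatest_succ]
    have hn := h (n+1) (by omega) le_rfl
    by_cases hP : P (n+1)
    · rw [if_pos hP, if_pos (hn.mp hP)]
    · rw [if_neg hP, if_neg (fun hq => hP (hn.mpr hq)), ih (fun k h1 h2 => h k h1 (by omega))]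

-- A's is_cross at k (1 ≤ k ≤ min) is exactly the suffix test
lemma is_cross_iff (str1 str2 : String) (k : Nat) (h1 : 1 ≤ k)
    (h2 : k ≤ str1.toList.length) (h3 : k ≤ str2.toList.length) :
    ((PySem.Str.slice str1 (some (-(k:Int))) none == PySem.Str.slice str2 none (some (k:Int))) = true)
      ↔ str2.toList.take k <:+ str1.toList := by
  have e1 : (PySem.Str.slice str1 (some (-(k:Int))) none).toList
      = str1.toList.drop (str1.toList.length - k) := by
    simp only [PySem.Str.toList_slice, PySem.Chars.slice_eq_listSlice,
      PySem.List.slice_from_neg_natCast str1.toList k h1]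
  have e2 : (PySem.Str.slice str2 none (some (k:Int))).toList = str2.toList.take k := by
    simp only [PySem.Str.toList_slice, PySem.Chars.slice_eq_listSlice, PySem.List.slice_to_natCast]
  rw [beq_iff_eq, ← suffix_iff_drop h3 h2]
  constructor
  · intro h
    have := congrArg String.toList h
    rw [e1, e2] at this
    exact this
  · intro h
    apply String.toList_inj.mp
    rw [e1, e2]
    exact h

-- A's cross_length equals Nat.findGreatest of the suffix test below min
lemma A_value (str1 str2 : String) :
    (PySem.List.pyRange 0 (min (PySem.Str.len str1) (PySem.Str.len str2)) 1).foldl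
        (fun c i => if PySem.Str.slice str1 (some (-i)) none == PySem.Str.slice str2 none (some i) then i else c) 0
      = ((Nat.findGreatest (fun k => str2.toList.take k <:+ str1.toList)
            (min str1.toList.length str2.toList.length - 1) : Nat) : Int) := by
  set m := min str1.toList.length str2.toList.length with hm
  have hmin : min (PySem.Str.len str1) (PySem.Str.len str2) = ((m : Nat) : Int) := by
    simp [PySem.Str.len_eq, hm, Nat.cast_min]
  rw [hmin]
  have hrange : PySem.List.pyRange 0 ((m : Nat) : Int) 1
      = (List.range m).map (fun k : Nat => (k : Int)) := by
    rw [PySem.List.pyRange_one]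
    simp [hm, -Nat.cast_min]
  rw [hrange, List.foldl_map, foldl_keepLast_cast
    (fun i => PySem.Str.slice str1 (some (-i)) none == PySem.Str.slice str2 none (some i)) m]
  congr 1
  rw [foldl_keepLast_findGreatest]
  apply findGreatest_congr
  intro k hk1 hk2
  exact is_cross_iff str1 str2 k hk1 (by omega) (by omega)

-- B's state is Mx
lemma B_state (str1 str2 : String) (hp : str2.toList ≠ []) :
    str1.toList.foldl
        (kmpStreamStep str2.toList
          (((List.range' 1 (str2.toList.length - 1)).foldl (kmpBuildStep str2.toList)
            (List.replicate str2.toList.length 0, 0)).1)) 0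
      = Mx str2.toList str1.toList :=
  stream_inv str2.toList _ hp (build_correct str2.toList hp) str1.toList

-- ===== VERDICT (by name: the statement is the Claim_ definition above) =====
theorem connect_strings_spec : Claim_unchanged_connect_strings := by
  intro str1 str2 _ hnD
  by_cases hp : str2.toList = []
  · have h2 : str2 = "" := String.toList_inj.mp (by simpa using hp)
    subst h2
    have hm0 : min (PySem.Str.len str1) (PySem.Str.len "") = 0 := by
      rw [PySem.Str.len_eq]
      have he : PySem.Str.len "" = 0 := rfl
      rw [he]
      omega
    unfold connect_strings connect_strings_alt
    rw [if_pos hp]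
    simp only [hm0, show PySem.List.pyRange 0 0 1 = [] from rfl, List.foldl_nil,
      show PySem.Str.slice "" (some 0) none = "" from by decide]
  · unfold D_connect_strings at hnD
    unfold connect_strings connect_strings_alt
    rw [if_neg hp]
    simp only []
    rw [B_state str1 str2 hp, A_value str1 str2]
    set t := str1.toList
    set p := str2.toList
    set m := min t.length p.length with hm
    have hMx : Mx p t = Nat.findGreatest (fun k => p.take k <:+ t) (m - 1) := by
      have hKle : Mx p t ≤ p.length := Mx_le p t
      have hKt : Mx p t ≤ t.length := Mx_le_len p t
      have hKm : Mx p t ≤ m := by omega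
      by_cases hm0 : m = 0
      · rw [eq_comm, Nat.findGreatest_eq_iff]
        refine ⟨by omega, fun h => absurd (by omega : Mx p t = 0) h, ?_⟩
        · intro k hk1 hk2 _
          omega
      · have hMnm : Mx p t ≠ m := by
          intro h
          apply hnD
          refine ⟨by omega, ?_⟩
          rw [suffix_iff_drop (by omega) (by omega)]
          have := Mx_suffix p t
          rwa [h] at this
        rw [eq_comm, Nat.findGreatest_eq_iff]
        refine ⟨by omega, fun _ => Mx_suffix p t, ?_⟩
        intro k hk1 hk2 hks
        have := le_Mx (p := p) (t := t) (k := k) (by omega) hks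
        omega
    rw [hMx]
theorem connect_strings_changed : Claim_changed_connect_strings := by
  unfold Claim_changed_connect_strings; decide
theorem connect_strings_tight : Claim_exact_connect_strings := by
  intro str1 str2 _ hD
  obtain ⟨hm1, hmatch⟩ := hD
  set t := str1.toList
  set p := str2.toList
  set m := min t.length p.length with hm
  have hp : p ≠ [] := by
    intro h
    rw [h] at hm
    simp at hm
    omega
  intro hEq
  have h1 := congrArg Prod.fst hEq
  rw [connect_strings, connect_strings_alt, if_neg hp] at h1
  simp only [] at h1
  rw [B_state str1 str2 hp, A_value str1 str2] at h1
  have hMxm : Mx p t = m := by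
    have h2 : p.take m <:+ t := by
      rw [← suffix_iff_drop (by omega) (by omega)]
      exact hmatch
    have := le_Mx (p := p) (t := t) (k := m) (by omega) h2
    have := Mx_le p t
    have := Mx_le_len p t
    omega
  have hA : Nat.findGreatest (fun k => p.take k <:+ t) (m - 1) ≤ m - 1 :=
    Nat.findGreatest_le _
  rw [hMxm] at h1
  have h2 : Nat.findGreatest (fun k => List.take k p <:+ t) (m - 1) = m := by
    exact_mod_cast h1
  omega
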